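-- pv_equiv track=rewrite | github.com/ry6666/RAG | src/retrieval/bridge_retriever.py | _detect_ambiguous_entities
-- ===== SOURCE A (Python) =====
-- from typing import List, Dict
--
-- def _detect_ambiguous_entities(entities: List[str], results: List[Dict]) -> set:
--     """检测模糊实体：同名但在不同上下文中指代不同事物
--
--     模糊实体判断标准：
--     1. 实体名过短（<4字符）但不是常见缩写
--     2. 实体在检索结果中出现在多种不同主题的chunk中
--     3. 实体与多个不同的bridge_entity关联
--     """
--     ambiguous = set()
--
--     for entity in entities:
--         entity_lower = entity.lower()
--
--         if len(entity) < 4: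
--             common_short_entities = {'usa', 'uk', 'nyc', 'la', 'sf', 'ai', 'ml', 'dj', 'tv'}
--             if entity_lower not in common_short_entities:
--                 ambiguous.add(entity)
--                 continue
--
--         associated_bridge_entities = set()
--         topic_variety = set()
--
--         for r in results[:20]:
--             core_text = r.get("core_text", "").lower()
--             chunk_bridge_entity = r.get("bridge_entity", "").lower()
--
--             if entity_lower in core_text:
--                 associated_bridge_entities.add(chunk_bridge_entity)
--
--                 first_sentence = core_text.split('.')[0][:50] if '.' in core_text else core_text[:50]
--                 topic_variety.add(first_sentence)
--
--         if len(associated_bridge_entities) >= 3: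
--             ambiguous.add(entity)
--         elif len(topic_variety) >= 3 and len(associated_bridge_entities) >= 2:
--             ambiguous.add(entity)
--
--     return ambiguous
-- ===== SOURCE B (Python) =====
-- def _detect_ambiguous_entities(entities, results):
--     """Inverted decomposition: precompute lowered texts/topics for results[:20] once,
--     then one results-outer/keys-inner accumulation into per-entity dicts."""
--     common_short = {'usa', 'uk', 'nyc', 'la', 'sf', 'ai', 'ml', 'dj', 'tv'}
--
--     def eligible(e):
--         return not (len(e) < 4 and e.lower() not in common_short)
--
--     # distinct lowered names of entities that take part in accumulation, first-seen order
--     keys = []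
--     seen = set()
--     for e in entities:
--         el = e.lower()
--         if eligible(e) and el not in seen:
--             seen.add(el)
--             keys.append(el)
--
--     # one pass over the first 20 results: lowered core text, lowered bridge entity, topic key
--     pre = []
--     for r in results[:20]:
--         ct = r.get("core_text", "").lower()
--         be = r.get("bridge_entity", "").lower()
--         tp = ct.split('.')[0][:50] if '.' in ct else ct[:50]
--         pre.append((ct, be, tp))
--
--     bridges = {k: set() for k in keys}
--     topics = {k: set() for k in keys}
--     for ct, be, tp in pre:
--         for k in keys:
--             if k in ct:
--                 bridges[k].add(be)
--                 topics[k].add(tp)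
--
--     out = set()
--     for e in entities:
--         el = e.lower()
--         if not eligible(e):
--             out.add(e)
--         elif len(bridges[el]) >= 3 or (len(topics[el]) >= 3 and len(bridges[el]) >= 2):
--             out.add(e)
--     return out
-- ===== Notes on version B (the rewrite author's own statement) =====
-- stated objective: alternative
-- what changed: Inverts the loop nest: one precomputation pass lowers the first-20 results and derives each topic key once, a distinct-key list plus results-outer/keys-inner accumulation fills per-entity bridge/topic sets in dicts, and a final pass thresholds the dict entries, instead of A's per-entity rescans that re-lower and re-split every result text for every entity.
import Mathlib
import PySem

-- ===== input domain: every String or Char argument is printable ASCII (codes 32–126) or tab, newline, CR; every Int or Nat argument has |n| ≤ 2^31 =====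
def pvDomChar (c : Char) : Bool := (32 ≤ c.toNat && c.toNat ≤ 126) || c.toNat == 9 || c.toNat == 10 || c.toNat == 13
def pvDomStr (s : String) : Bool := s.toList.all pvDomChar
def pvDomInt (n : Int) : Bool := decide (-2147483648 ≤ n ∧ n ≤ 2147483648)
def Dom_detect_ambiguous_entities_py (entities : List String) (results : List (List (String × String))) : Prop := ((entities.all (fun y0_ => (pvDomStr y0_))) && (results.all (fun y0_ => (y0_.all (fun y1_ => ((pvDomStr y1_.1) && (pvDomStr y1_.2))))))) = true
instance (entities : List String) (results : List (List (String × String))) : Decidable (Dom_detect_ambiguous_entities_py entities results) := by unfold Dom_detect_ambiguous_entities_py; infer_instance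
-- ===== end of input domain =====

-- B replaces A's per-entity rescans by a single precomputation pass over results[:20] and an
-- inverted results-outer/keys-inner accumulation into per-entity dicts (objective: alternative decomposition).

-- ===== PORT A =====
-- the common-short-entities set literal
def pvCommons : PySem.Set String := ["usa", "uk", "nyc", "la", "sf", "ai", "ml", "dj", "tv"]

-- first_sentence = core_text.split('.')[0][:50] if '.' in core_text else core_text[:50]
def pvTopicOf (ct : String) : String :=
  if PySem.Str.isIn "." ct then
    PySem.Str.slice (((PySem.Str.split? ct ".").getD []).getD 0 "") none (some 50)
  else
    PySem.Str.slice ct none (some 50)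

def detect_ambiguous_entities_py (entities : List String) (results : List (List (String × String))) : List String :=
  entities.foldl (fun ambiguous entity =>
    let el := PySem.Str.lower entity
    -- len(entity) < 4 and entity_lower not in common_short_entities → add + continue
    if PySem.Str.len entity < 4 ∧ PySem.Set.contains pvCommons el = false then
      PySem.Set.add ambiguous entity
    else
      let bt := (PySem.List.slice results none (some 20)).foldl
        (fun (bt : PySem.Set String × PySem.Set String) r =>
          let ct := PySem.Str.lower ((PySem.Dict.mk r).getD "core_text" "")
          let be := PySem.Str.lower ((PySem.Dict.mk r).getD "bridge_entity" "")
          if PySem.Str.isIn el ct then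
            (PySem.Set.add bt.1 be, PySem.Set.add bt.2 (pvTopicOf ct))
          else bt)
        (([] : PySem.Set String), ([] : PySem.Set String))
      if 3 ≤ PySem.Set.len bt.1 then PySem.Set.add ambiguous entity
      else if 3 ≤ PySem.Set.len bt.2 ∧ 2 ≤ PySem.Set.len bt.1 then PySem.Set.add ambiguous entity
      else ambiguous)
    ([] : PySem.Set String)

-- ===== PORT B =====
def pvEligible (e : String) : Bool :=
  !(decide (PySem.Str.len e < 4) && !(PySem.Set.contains pvCommons (PySem.Str.lower e)))

-- distinct lowered names of eligible entities, first-seen order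
def pvKeys (entities : List String) : PySem.Set String :=
  entities.foldl (fun ks e => if pvEligible e then PySem.Set.add ks (PySem.Str.lower e) else ks)
    ([] : PySem.Set String)

-- one pass over results[:20]
def pvPre (results : List (List (String × String))) : List (String × String × String) :=
  (PySem.List.slice results none (some 20)).map (fun r =>
    let ct := PySem.Str.lower ((PySem.Dict.mk r).getD "core_text" "")
    let be := PySem.Str.lower ((PySem.Dict.mk r).getD "bridge_entity" "")
    (ct, be, pvTopicOf ct))

-- {k: set() for k in keys}
def pvInit (ks : List String) : PySem.Dict String (PySem.Set String) :=
  ks.foldl (fun d k => d.insert k ([] : PySem.Set String)) PySem.Dict.empty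

-- inner loop body: for k in keys: if k in ct: bridges[k].add(be); topics[k].add(tp)
def pvInner (x : String × String × String)
    (bt : PySem.Dict String (PySem.Set String) × PySem.Dict String (PySem.Set String)) (k : String) :
    PySem.Dict String (PySem.Set String) × PySem.Dict String (PySem.Set String) :=
  if PySem.Str.isIn k x.1 then
    (bt.1.modify k [] (fun s => PySem.Set.add s x.2.1), bt.2.modify k [] (fun s => PySem.Set.add s x.2.2))
  else bt

def pvDicts (ks : List String) (pre : List (String × String × String)) :
    PySem.Dict String (PySem.Set String) × PySem.Dict String (PySem.Set String) :=
  pre.foldl (fun bt x => ks.foldl (pvInner x) bt) (pvInit ks, pvInit ks)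

def detect_ambiguous_entities_py_alt (entities : List String) (results : List (List (String × String))) : List String :=
  let bt := pvDicts (pvKeys entities) (pvPre results)
  entities.foldl (fun out e =>
    let el := PySem.Str.lower e
    if !pvEligible e then PySem.Set.add out e
    else if 3 ≤ PySem.Set.len (bt.1.getD el []) ∨
            (3 ≤ PySem.Set.len (bt.2.getD el []) ∧ 2 ≤ PySem.Set.len (bt.1.getD el [])) then
      PySem.Set.add out e
    else out)
    ([] : PySem.Set String)

-- ===== PRECONDITION & SPEC =====
def Spec_detect_ambiguous_entities_py (entities : List String) (results : List (List (String × String))) (out : List String) : Prop := out = detect_ambiguous_entities_py_alt entities results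
instance (entities : List String) (results : List (List (String × String))) (out : List String) : Decidable (Spec_detect_ambiguous_entities_py entities results out) := by unfold Spec_detect_ambiguous_entities_py; infer_instance

-- ===== CLAIM (what is proved, stated in full; the proofs are below) =====
def Claim_equal_detect_ambiguous_entities_py : Prop := ∀ (entities : List String) (results : List (List (String × String))), Dom_detect_ambiguous_entities_py entities results → Spec_detect_ambiguous_entities_py entities results (detect_ambiguous_entities_py entities results)

-- ===== LEMMAS AND PROOFS =====

-- the per-entity accumulation, abstracted over the precomputed triples
def pvAccB (el : String) (pre : List (String × String × String))
    (init : PySem.Set String × PySem.Set String) : PySem.Set String × PySem.Set String :=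
  pre.foldl (fun bt x =>
    if PySem.Str.isIn el x.1 then (PySem.Set.add bt.1 x.2.1, PySem.Set.add bt.2 x.2.2) else bt) init

-- A's inner result loop computes pvAccB over the precomputed triples
theorem pvA_inner_eq (el : String) (results : List (List (String × String)))
    (init : PySem.Set String × PySem.Set String) :
    (PySem.List.slice results none (some 20)).foldl
      (fun (bt : PySem.Set String × PySem.Set String) r =>
        let ct := PySem.Str.lower ((PySem.Dict.mk r).getD "core_text" "")
        let be := PySem.Str.lower ((PySem.Dict.mk r).getD "bridge_entity" "")
        if PySem.Str.isIn el ct then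
          (PySem.Set.add bt.1 be, PySem.Set.add bt.2 (pvTopicOf ct))
        else bt) init
    = pvAccB el (pvPre results) init := by
  simp only [pvAccB, pvPre, List.foldl_map]

theorem pvKeys_mono (l : List String) (acc : PySem.Set String) (x : String) (hx : x ∈ acc) :
    x ∈ l.foldl (fun ks e => if pvEligible e then PySem.Set.add ks (PySem.Str.lower e) else ks) acc := by
  induction l generalizing acc with
  | nil => exact hx
  | cons e l ih =>
    simp only [List.foldl_cons]
    apply ih
    split
    · exact (PySem.Set.mem_add _ _ _).mpr (Or.inl hx)
    · exact hx

theorem pvKeys_mem (entities : List String) (e : String) (he : e ∈ entities)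
    (helig : pvEligible e = true) : PySem.Str.lower e ∈ pvKeys entities := by
  unfold pvKeys
  generalize ([] : PySem.Set String) = acc
  induction entities generalizing acc with
  | nil => cases he
  | cons a l ih =>
    simp only [List.foldl_cons]
    rcases List.mem_cons.mp he with rfl | hmem
    · apply pvKeys_mono
      rw [helig]
      exact (PySem.Set.mem_add _ _ _).mpr (Or.inr rfl)
    · exact ih hmem _

theorem pvKeys_nodup (entities : List String) : (pvKeys entities).Nodup := by
  unfold pvKeys
  have h : ∀ (l : List String) (acc : PySem.Set String), acc.Nodup →
      (l.foldl (fun ks e => if pvEligible e then PySem.Set.add ks (PySem.Str.lower e) else ks) acc).Nodup := by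
    intro l
    induction l with
    | nil => intro acc h; exact h
    | cons a l ih =>
      intro acc h
      simp only [List.foldl_cons]
      apply ih
      split
      · exact PySem.Set.nodup_add _ _ h
      · exact h
  exact h _ _ List.nodup_nil

-- every key of the initial dicts maps to the empty set
theorem pvInit_getD (ks : List String) (k : String) : (pvInit ks).getD k [] = [] := by
  unfold pvInit
  have h : ∀ (l : List String) (d : PySem.Dict String (PySem.Set String)),
      (∀ j, d.getD j ([] : PySem.Set String) = []) →
      ∀ j, (l.foldl (fun d k => d.insert k ([] : PySem.Set String)) d).getD j [] = [] := by
    intro l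
    induction l with
    | nil => intro d h j; exact h j
    | cons a l ih =>
      intro d h j
      simp only [List.foldl_cons]
      apply ih
      intro j'
      rw [PySem.Dict.getD_insert]
      split <;> [rfl; exact h j']
  exact h _ _ (fun j => PySem.Dict.getD_empty ..) k

-- effect of the inner keys-loop on one key
theorem pvInner_getD (x : String × String × String) :
    ∀ (ks : List String), ks.Nodup →
    ∀ (bt : PySem.Dict String (PySem.Set String) × PySem.Dict String (PySem.Set String)) (k : String),
      ((ks.foldl (pvInner x) bt).1.getD k [] =
        (if k ∈ ks ∧ PySem.Str.isIn k x.1 then PySem.Set.add (bt.1.getD k []) x.2.1 else bt.1.getD k [])) ∧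
      ((ks.foldl (pvInner x) bt).2.getD k [] =
        (if k ∈ ks ∧ PySem.Str.isIn k x.1 then PySem.Set.add (bt.2.getD k []) x.2.2 else bt.2.getD k [])) := by
  intro ks
  induction ks with
  | nil => intro _ bt k; simp
  | cons k0 rest ih =>
    intro hnd bt k
    have hnd' := hnd.of_cons
    have hk0 : k0 ∉ rest := (List.nodup_cons.mp hnd).1
    simp only [List.foldl_cons]
    by_cases hk : k = k0
    · subst hk
      have hrest := ih hnd' (pvInner x bt k) k
      have hknr : ¬ (k ∈ rest ∧ PySem.Str.isIn k x.1 = true) := fun h => hk0 h.1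
      rw [if_neg hknr] at hrest
      by_cases hin : PySem.Str.isIn k x.1 = true
      · have e1 : (pvInner x bt k).1.getD k [] = PySem.Set.add (bt.1.getD k []) x.2.1 := by
          unfold pvInner; rw [if_pos hin]; exact PySem.Dict.getD_modify_self _ _ _ _
        have e2 : (pvInner x bt k).2.getD k [] = PySem.Set.add (bt.2.getD k []) x.2.2 := by
          unfold pvInner; rw [if_pos hin]; exact PySem.Dict.getD_modify_self _ _ _ _
        refine ⟨?_, ?_⟩
        · rw [hrest.1, e1, if_pos (⟨(List.mem_cons_self : k ∈ k :: rest), hin⟩ : k ∈ k :: rest ∧ PySem.Str.isIn k x.1 = true)]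
        · rw [hrest.2, e2, if_pos (⟨(List.mem_cons_self : k ∈ k :: rest), hin⟩ : k ∈ k :: rest ∧ PySem.Str.isIn k x.1 = true), if_neg hknr]
      · have e1 : pvInner x bt k = bt := by unfold pvInner; rw [if_neg hin]
        rw [e1] at hrest
        refine ⟨?_, ?_⟩
        · rw [e1, hrest.1, if_neg (fun h => hin h.2)]
        · rw [e1, hrest.2, if_neg (fun h => hin h.2), if_neg (fun h => hin h.2)]
    · have hrest := ih hnd' (pvInner x bt k0) k
      have h1 : (pvInner x bt k0).1.getD k [] = bt.1.getD k [] := by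
        unfold pvInner
        split
        · exact PySem.Dict.getD_modify_of_ne _ _ _ hk
        · rfl
      have h2 : (pvInner x bt k0).2.getD k [] = bt.2.getD k [] := by
        unfold pvInner
        split
        · exact PySem.Dict.getD_modify_of_ne _ _ _ hk
        · rfl
      rw [h1, h2] at hrest
      have hmem : (k ∈ k0 :: rest ∧ PySem.Str.isIn k x.1 = true) ↔ (k ∈ rest ∧ PySem.Str.isIn k x.1 = true) := by
        constructor
        · rintro ⟨hm, hi⟩; exact ⟨(List.mem_cons.mp hm).resolve_left hk, hi⟩
        · rintro ⟨hm, hi⟩; exact ⟨List.mem_cons.mpr (Or.inr hm), hi⟩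
      constructor
      · rw [hrest.1]; by_cases h : k ∈ rest ∧ PySem.Str.isIn k x.1 = true
        · rw [if_pos h, if_pos (hmem.mpr h)]
        · rw [if_neg h, if_neg (fun hc => h (hmem.mp hc))]
      · rw [hrest.2]; by_cases h : k ∈ rest ∧ PySem.Str.isIn k x.1 = true
        · rw [if_pos h, if_pos (hmem.mpr h)]
        · rw [if_neg h, if_neg (fun hc => h (hmem.mp hc))]

-- effect of the whole precomputation fold on one present key
theorem pvOuter_getD (ks : List String) (hnd : ks.Nodup) (k : String) (hk : k ∈ ks) :
    ∀ (pre : List (String × String × String))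
      (bt : PySem.Dict String (PySem.Set String) × PySem.Dict String (PySem.Set String)),
      ((pre.foldl (fun bt x => ks.foldl (pvInner x) bt) bt).1.getD k [],
       (pre.foldl (fun bt x => ks.foldl (pvInner x) bt) bt).2.getD k [])
      = pvAccB k pre (bt.1.getD k [], bt.2.getD k []) := by
  intro pre
  induction pre with
  | nil => intro bt; rfl
  | cons x pre ih =>
    intro bt
    simp only [List.foldl_cons]
    rw [ih]
    have h := pvInner_getD x ks hnd bt k
    unfold pvAccB
    simp only [List.foldl_cons]
    rw [h.1, h.2]
    by_cases hin : PySem.Str.isIn k x.1 = true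
    · rw [if_pos ⟨hk, hin⟩, if_pos ⟨hk, hin⟩, if_pos hin]
    · rw [if_neg (fun h => hin h.2), if_neg (fun h => hin h.2), if_neg hin]

-- the dict entry of an eligible entity's lowered name is exactly A's per-entity pair
theorem pvDicts_getD (entities : List String) (pre : List (String × String × String))
    (k : String) (hk : k ∈ pvKeys entities) :
    ((pvDicts (pvKeys entities) pre).1.getD k [], (pvDicts (pvKeys entities) pre).2.getD k [])
      = pvAccB k pre ([], []) := by
  unfold pvDicts
  rw [pvOuter_getD (pvKeys entities) (pvKeys_nodup entities) k hk pre, pvInit_getD]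

-- ===== VERDICT (by name: the statement is the Claim_ definition above) =====
theorem detect_ambiguous_entities_py_spec : Claim_equal_detect_ambiguous_entities_py := by
  intro entities results _
  unfold Spec_detect_ambiguous_entities_py
  unfold detect_ambiguous_entities_py detect_ambiguous_entities_py_alt
  apply (PySem.List.foldl_congr_mem entities _ _ _ _)
  intro acc e he
  have hiff : pvEligible e = false ↔ (PySem.Str.len e < 4 ∧ PySem.Set.contains pvCommons (PySem.Str.lower e) = false) := by
    unfold pvEligible
    rcases hlt : decide (PySem.Str.len e < 4) with _ | _ <;>
      rcases hcb : PySem.Set.contains pvCommons (PySem.Str.lower e) with _ | _ <;>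
      simp_all
  by_cases helig : pvEligible e = true
  · have hA : ¬ (PySem.Str.len e < 4 ∧ PySem.Set.contains pvCommons (PySem.Str.lower e) = false) := by
      intro h
      rw [hiff.mpr h] at helig
      exact Bool.false_ne_true helig
    rw [if_neg hA, helig]
    simp only [Bool.not_true, if_neg (Bool.false_ne_true)]
    have hmem := pvKeys_mem entities e he helig
    have hd := pvDicts_getD entities (pvPre results) (PySem.Str.lower e) hmem
    have h1 : (pvDicts (pvKeys entities) (pvPre results)).1.getD (PySem.Str.lower e) []
        = (pvAccB (PySem.Str.lower e) (pvPre results) ([], [])).1 := by rw [← hd]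
    have h2 : (pvDicts (pvKeys entities) (pvPre results)).2.getD (PySem.Str.lower e) []
        = (pvAccB (PySem.Str.lower e) (pvPre results) ([], [])).2 := by rw [← hd]
    rw [pvA_inner_eq (PySem.Str.lower e) results, h1, h2]
    set b := (pvAccB (PySem.Str.lower e) (pvPre results) ([], [])).1
    set t := (pvAccB (PySem.Str.lower e) (pvPre results) ([], [])).2
    by_cases hb : 3 ≤ PySem.Set.len b
    · rw [if_pos hb, if_pos (Or.inl hb)]
    · rw [if_neg hb]
      by_cases ht : 3 ≤ PySem.Set.len t ∧ 2 ≤ PySem.Set.len b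
      · rw [if_pos ht, if_pos (Or.inr ht)]
      · rw [if_neg ht, if_neg (by tauto)]
  · have hfalse : pvEligible e = false := Bool.eq_false_iff.mpr helig
    rw [if_pos (hiff.mp hfalse), hfalse]
    simp
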